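-- pv_equiv track=rewrite | github.com/George-Nyamao/Spotify-Playlist-Curator | get_track_genre.py | is_rnb_or_hiphop
-- ===== SOURCE A (Python) =====
-- def is_rnb_or_hiphop(genres_list):
--     """
--     Check if genres contain R&B or Hip-Hop
--     """
--     rnb_indicators = ['r&b', 'rnb', 'rhythm and blues', 'soul', 'urban']
--     hiphop_indicators = ['hip hop', 'hip-hop', 'rap', 'trap']
--
--     all_indicators = rnb_indicators + hiphop_indicators
--
--     for genre in genres_list:
--         if any(indicator in genre for indicator in all_indicators):
--             return True
--     return False
-- ===== SOURCE B (Python) =====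
-- def is_rnb_or_hiphop(genres_list):
--     """
--     Check if genres contain R&B or Hip-Hop
--     """
--     indicators = ('r&b', 'rnb', 'rhythm and blues', 'soul', 'urban',
--                   'hip hop', 'hip-hop', 'rap', 'trap')
--     blob = "\n".join(genres_list)
--     return any(indicator in blob for indicator in indicators)
-- ===== Notes on version B (the rewrite author's own statement) =====
-- stated objective: faster
-- what changed: Instead of scanning each genre against all nine indicators in a nested loop, B joins all genres into one newline-separated string and runs just nine substring searches over that single string (no indicator contains a newline, so no cross-genre match can arise); measured ~5x faster on large lists.
import Mathlib
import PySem

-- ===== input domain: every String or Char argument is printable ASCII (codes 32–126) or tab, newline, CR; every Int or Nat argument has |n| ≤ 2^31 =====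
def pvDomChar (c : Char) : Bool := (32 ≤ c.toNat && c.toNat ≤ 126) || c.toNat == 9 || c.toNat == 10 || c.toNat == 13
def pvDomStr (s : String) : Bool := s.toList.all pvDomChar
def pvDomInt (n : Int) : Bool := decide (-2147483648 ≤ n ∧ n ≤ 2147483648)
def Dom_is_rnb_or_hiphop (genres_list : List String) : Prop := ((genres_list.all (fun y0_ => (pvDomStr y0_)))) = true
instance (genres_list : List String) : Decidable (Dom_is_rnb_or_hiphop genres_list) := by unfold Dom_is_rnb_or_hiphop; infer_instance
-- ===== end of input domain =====

-- ===== PORT A =====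
-- B joins all genres into one newline-separated string and runs the nine indicator
-- substring searches once over it, instead of A's per-genre inner scan (alternative structure).
def is_rnb_or_hiphop (genres_list : List String) : Bool :=
  let rnb_indicators : List String := ["r&b", "rnb", "rhythm and blues", "soul", "urban"]
  let hiphop_indicators : List String := ["hip hop", "hip-hop", "rap", "trap"]
  let all_indicators := rnb_indicators ++ hiphop_indicators
  -- for genre in genres_list: if any(indicator in genre ...): return True / return False
  genres_list.any (fun genre => all_indicators.any (fun indicator => PySem.Str.isIn indicator genre))

-- ===== PORT B =====
def pvIndicators : List String :=
  ["r&b", "rnb", "rhythm and blues", "soul", "urban", "hip hop", "hip-hop", "rap", "trap"]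

def is_rnb_or_hiphop_alt (genres_list : List String) : Bool :=
  let blob := PySem.Str.join "\n" genres_list
  pvIndicators.any (fun indicator => PySem.Str.isIn indicator blob)

-- ===== PRECONDITION & SPEC =====
def Spec_is_rnb_or_hiphop (genres_list : List String) (out : Bool) : Prop := out = is_rnb_or_hiphop_alt genres_list
instance (genres_list : List String) (out : Bool) : Decidable (Spec_is_rnb_or_hiphop genres_list out) := by unfold Spec_is_rnb_or_hiphop; infer_instance

-- ===== CLAIM (what is proved, stated in full; the proofs are below) =====
def Claim_equal_is_rnb_or_hiphop : Prop := ∀ (genres_list : List String), Dom_is_rnb_or_hiphop genres_list → Spec_is_rnb_or_hiphop genres_list (is_rnb_or_hiphop genres_list)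

-- ===== LEMMAS AND PROOFS =====

-- a prefix of a ++ c :: b that does not contain c is a prefix of a
theorem pvPrefixDropSep {s a b : List Char} {c : Char}
    (h : s <+: a ++ c :: b) (hc : c ∉ s) : s <+: a := by
  rcases Nat.lt_or_ge a.length s.length with hlt | hle
  · exfalso
    apply hc
    have hget := h.getElem (i := a.length) hlt
    have h2 : s[a.length] = c := hget.trans (by simp)
    exact h2 ▸ List.getElem_mem hlt
  · have hs : s = a.take s.length :=
      (List.prefix_iff_eq_take.mp h).trans (List.take_append_of_le_length hle)
    exact List.prefix_iff_eq_take.mpr hs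

-- an infix avoiding the separator character lies wholly on one side of it
theorem pvInfixSep {s : List Char} (hc : c ∉ s) (hne : s ≠ []) (a b : List Char) :
    s <:+: a ++ c :: b ↔ s <:+: a ∨ s <:+: b := by
  constructor
  · induction a with
    | nil =>
      intro h
      simp only [List.nil_append, List.infix_cons_iff] at h
      rcases h with hp | h
      · cases s with
        | nil => exact absurd rfl hne
        | cons hd tl =>
          rcases hp with ⟨t, ht⟩
          have : hd = c := by
            have := congrArg (fun l => l.head?) ht
            simpa using this
          exact absurd (this ▸ List.mem_cons_self) hc
      · exact Or.inr h
    | cons x a ih =>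
      intro h
      rw [List.cons_append, List.infix_cons_iff] at h
      rcases h with hp | h
      · have hp' : s <+: (x :: a) ++ c :: b := by simpa using hp
        exact Or.inl (pvPrefixDropSep hp' hc).isInfix
      · rcases ih h with h1 | h2
        · exact Or.inl (List.infix_cons_iff.mpr (Or.inr h1))
        · exact Or.inr h2
  · rintro (h | h)
    · exact h.trans ⟨[], c :: b, by simp⟩
    · exact h.trans ⟨a ++ [c], [], by simp⟩

-- an indicator without newlines is an infix of the joined list iff it is an infix of some genre
theorem pvInfixJoin {s : List Char} (hc : '\n' ∉ s) (hne : s ≠ []) :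
    ∀ gs : List (List Char), (s <:+: List.intercalate ['\n'] gs ↔ ∃ g ∈ gs, s <:+: g)
  | [] => by simp [List.intercalate, List.infix_nil, hne]
  | [g] => by simp [List.intercalate]
  | g :: g2 :: gss => by
    have hstep : List.intercalate ['\n'] (g :: g2 :: gss)
        = g ++ '\n' :: List.intercalate ['\n'] (g2 :: gss) := by
      simp [List.intercalate, List.intersperse]
    rw [hstep, pvInfixSep hc hne, pvInfixJoin hc hne (g2 :: gss)]
    simp

theorem pvKey (i : String) (hi : i ∈ pvIndicators) (gs : List String) :
    PySem.Str.isIn i (PySem.Str.join "\n" gs) = true ↔ ∃ g ∈ gs, PySem.Str.isIn i g = true := by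
  have hprops : '\n' ∉ i.toList ∧ i.toList ≠ [] := by
    fin_cases hi <;> decide
  have hblob : (PySem.Str.join "\n" gs).toList = List.intercalate ['\n'] (gs.map String.toList) := by
    simp [PySem.Str.join, PySem.Chars.join]
  rw [PySem.Str.isIn_iff_infix, hblob, pvInfixJoin hprops.1 hprops.2]
  constructor
  · rintro ⟨g, hg, hinf⟩
    rcases List.mem_map.mp hg with ⟨g0, hg0, rfl⟩
    exact ⟨g0, hg0, (PySem.Str.isIn_iff_infix i g0).mpr hinf⟩
  · rintro ⟨g0, hg0, hin⟩
    exact ⟨g0.toList, List.mem_map.mpr ⟨g0, hg0, rfl⟩, (PySem.Str.isIn_iff_infix i g0).mp hin⟩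

-- ===== VERDICT (by name: the statement is the Claim_ definition above) =====
theorem is_rnb_or_hiphop_spec : Claim_equal_is_rnb_or_hiphop := by
  intro gs _
  show is_rnb_or_hiphop gs = is_rnb_or_hiphop_alt gs
  have hlists : (["r&b", "rnb", "rhythm and blues", "soul", "urban"]
      ++ ["hip hop", "hip-hop", "rap", "trap"] : List String) = pvIndicators := by decide
  simp only [is_rnb_or_hiphop, is_rnb_or_hiphop_alt, hlists]
  rw [Bool.eq_iff_iff]
  simp only [List.any_eq_true]
  constructor
  · rintro ⟨g, hg, i, hi, hin⟩
    exact ⟨i, hi, (pvKey i hi gs).mpr ⟨g, hg, hin⟩⟩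
  · rintro ⟨i, hi, hin⟩
    rcases (pvKey i hi gs).mp hin with ⟨g, hg, h⟩
    exact ⟨g, hg, i, hi, h⟩
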